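-- pv_equiv track=rewrite | github.com/joserocha94/RV | application/routes.py | is_terminal_stop
-- ===== SOURCE A (Python) =====
-- routes = [
--     ([0, 1, 2, 3, 4]),
--     ([0, 5, 6, 7, 8])
-- ]
--
-- def is_terminal_stop(id_route, stop_id):
--
--     found_index = -1
--     bool = False
--
--     for i in range (0, len(routes[id_route])):
--         if (stop_id == routes[id_route][i]):
--             found_index = i+1
--
--     bool = False if found_index < len(routes[id_route]) else True
--
--     return bool
-- ===== SOURCE B (Python) =====
-- routes = [
--     ([0, 1, 2, 3, 4]),
--     ([0, 5, 6, 7, 8])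
-- ]
--
-- def is_terminal_stop(id_route, stop_id):
--     route = routes[id_route]
--     return len(route) > 0 and route[-1] == stop_id
-- ===== Notes on version B (the rewrite author's own statement) =====
-- stated objective: faster
-- what changed: Replaces the full scan recording the last match index with a single O(1) comparison of the route's last element against stop_id (guarded for an empty route).
import Mathlib
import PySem

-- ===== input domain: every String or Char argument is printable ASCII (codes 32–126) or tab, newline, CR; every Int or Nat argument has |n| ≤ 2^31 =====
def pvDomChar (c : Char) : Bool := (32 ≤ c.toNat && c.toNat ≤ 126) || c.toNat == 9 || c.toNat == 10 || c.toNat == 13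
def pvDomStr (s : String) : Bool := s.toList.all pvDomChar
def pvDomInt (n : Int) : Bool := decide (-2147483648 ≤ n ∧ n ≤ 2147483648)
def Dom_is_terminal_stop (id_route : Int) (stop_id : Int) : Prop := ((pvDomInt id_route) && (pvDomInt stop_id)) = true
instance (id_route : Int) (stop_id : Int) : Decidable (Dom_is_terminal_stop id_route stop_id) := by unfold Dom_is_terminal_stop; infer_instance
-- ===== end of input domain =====

-- B replaces A's full scan of the route with an O(1) check of the route's last element.

-- the module-level constant 'routes'
def pvRoutes : List (List Int) := [[0, 1, 2, 3, 4], [0, 5, 6, 7, 8]]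

-- ===== PORT A =====
-- literal port: scan all indices, remember (last match index)+1, compare with length
def is_terminal_stop (id_route : Int) (stop_id : Int) : Bool :=
  match PySem.List.pyGet? pvRoutes id_route with
  | none => false   -- unreachable under Pre_ (Python raises IndexError)
  | some route =>
    let found_index : Int :=
      (PySem.List.pyRange 0 (route.length : Int) 1).foldl
        (fun fi i => if stop_id == (PySem.List.pyGet? route i).getD 0 then i + 1 else fi) (-1)
    if found_index < (route.length : Int) then false else true

-- ===== PORT B =====
def is_terminal_stop_alt (id_route : Int) (stop_id : Int) : Bool :=
  match PySem.List.pyGet? pvRoutes id_route with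
  | none => false   -- unreachable under Pre_ (Python raises IndexError)
  | some route =>
    decide (0 < route.length) && ((PySem.List.pyGet? route (-1)).getD 0 == stop_id)

-- ===== PRECONDITION & SPEC =====
-- Pre_ excludes exactly the id_route values outside the two-element routes list, where A raises IndexError.
def Pre_is_terminal_stop (id_route : Int) (stop_id : Int) : Prop := -2 ≤ id_route ∧ id_route ≤ 1
instance (id_route : Int) (stop_id : Int) : Decidable (Pre_is_terminal_stop id_route stop_id) := by unfold Pre_is_terminal_stop; infer_instance
def pvWitness_is_terminal_stop : Int × Int := (0, 4)

def Spec_is_terminal_stop (id_route : Int) (stop_id : Int) (out : Bool) : Prop := out = is_terminal_stop_alt id_route stop_id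
instance (id_route : Int) (stop_id : Int) (out : Bool) : Decidable (Spec_is_terminal_stop id_route stop_id out) := by unfold Spec_is_terminal_stop; infer_instance

-- ===== CLAIM (what is proved, stated in full; the proofs are below) =====
def Claim_equal_is_terminal_stop : Prop := ∀ (id_route : Int) (stop_id : Int), Dom_is_terminal_stop id_route stop_id → Pre_is_terminal_stop id_route stop_id → Spec_is_terminal_stop id_route stop_id (is_terminal_stop id_route stop_id)

-- ===== LEMMAS AND PROOFS =====

-- for a fixed route the two bodies agree
lemma body_agree (route : List Int) (hr : route = [0, 1, 2, 3, 4] ∨ route = [0, 5, 6, 7, 8]) (stop_id : Int) :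
    (if ((PySem.List.pyRange 0 (route.length : Int) 1).foldl
          (fun fi i => if stop_id == (PySem.List.pyGet? route i).getD 0 then i + 1 else fi) (-1)) < (route.length : Int)
       then false else true)
    = (decide (0 < route.length) && ((PySem.List.pyGet? route (-1)).getD 0 == stop_id)) := by
  rcases hr with h | h <;> subst h <;>
    simp [PySem.List.pyRange, List.range_succ, PySem.List.pyGet?, PySem.List.pyIdx?] <;>
    split_ifs <;> simp_all <;> omega

-- ===== VERDICT (by name: the statement is the Claim_ definition above) =====
theorem is_terminal_stop_spec : Claim_equal_is_terminal_stop := by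
  intro id_route stop_id _ hpre
  unfold Spec_is_terminal_stop is_terminal_stop is_terminal_stop_alt
  obtain ⟨h1, h2⟩ := hpre
  have : id_route = -2 ∨ id_route = -1 ∨ id_route = 0 ∨ id_route = 1 := by omega
  rcases this with h | h | h | h <;> subst h <;>
    exact body_agree _ (by simp [PySem.List.pyGet?]) _
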